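-- pv_equiv track=rewrite | github.com/mohammadfaiizan/ProjectI | DSA/Problem/Queue_Stack/06_Advanced_Queue_Applications/1606_Find_Servers_That_Handled_Most_Number_of_Requests.py | busiestServers_optimized_heap
-- ===== SOURCE A (Python) =====
-- from typing import List
-- import heapq
--
-- def busiestServers_optimized_heap(k: int, arrival: List[int], load: List[int]) -> List[int]:
--     """
--     Approach 3: Optimized Heap with Set
--
--     Use heap for busy servers and set for available servers.
--
--     Time: O(n log k), Space: O(k)
--     """
--     import bisect
--
--     # Sorted list of available servers
--     available = list(range(k))
--
--     # Min heap for busy servers (end_time, server_id)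
--     busy = []
--
--     # Count requests handled by each server
--     request_count = [0] * k
--
--     for i in range(len(arrival)):
--         current_time = arrival[i]
--         request_load = load[i]
--
--         # Free up servers that have finished processing
--         while busy and busy[0][0] <= current_time:
--             _, server_id = heapq.heappop(busy)
--             bisect.insort(available, server_id)
--
--         if not available:
--             # All servers busy, drop request
--             continue
--
--         # Find the appropriate server
--         preferred_server = i % k
--
--         # Find the first available server >= preferred_server
--         idx = bisect.bisect_left(available, preferred_server)
--
--         if idx < len(available):
--             # Found server >= preferred_server
--             assigned_server = available.pop(idx)
--         else:
--             # Wrap around, use first available server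
--             assigned_server = available.pop(0)
--
--         # Assign request to server
--         end_time = current_time + request_load
--         heapq.heappush(busy, (end_time, assigned_server))
--         request_count[assigned_server] += 1
--
--     # Find servers with maximum requests
--     max_requests = max(request_count)
--     return [i for i in range(k) if request_count[i] == max_requests]
-- ===== SOURCE B (Python) =====
-- def busiestServers_optimized_heap(k, arrival, load):
--     # One flat state per server instead of a sorted available-list plus a busy heap:
--     # free flag + end time per server, a release sweep each request, and a cyclic
--     # scan from the preferred server for the assignment.
--     free = [True] * k
--     end = [0] * k
--     count = [0] * k
--     for i in range(len(arrival)):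
--         t = arrival[i]
--         for s in range(k):
--             if not free[s] and end[s] <= t:
--                 free[s] = True
--         for j in range(k):
--             s = (i + j) % k
--             if free[s]:
--                 free[s] = False
--                 end[s] = t + load[i]
--                 count[s] += 1
--                 break
--     m = max(count)
--     return [s for s in range(k) if count[s] == m]
-- ===== Notes on version B (the rewrite author's own statement) =====
-- stated objective: simpler
-- what changed: Replaces A's sorted available-list + busy min-heap + bisect machinery with one flat per-server state (free flag, end time, count): each request does a release sweep over the k servers and a cyclic scan from the preferred server for the first free one.
import Mathlib
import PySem

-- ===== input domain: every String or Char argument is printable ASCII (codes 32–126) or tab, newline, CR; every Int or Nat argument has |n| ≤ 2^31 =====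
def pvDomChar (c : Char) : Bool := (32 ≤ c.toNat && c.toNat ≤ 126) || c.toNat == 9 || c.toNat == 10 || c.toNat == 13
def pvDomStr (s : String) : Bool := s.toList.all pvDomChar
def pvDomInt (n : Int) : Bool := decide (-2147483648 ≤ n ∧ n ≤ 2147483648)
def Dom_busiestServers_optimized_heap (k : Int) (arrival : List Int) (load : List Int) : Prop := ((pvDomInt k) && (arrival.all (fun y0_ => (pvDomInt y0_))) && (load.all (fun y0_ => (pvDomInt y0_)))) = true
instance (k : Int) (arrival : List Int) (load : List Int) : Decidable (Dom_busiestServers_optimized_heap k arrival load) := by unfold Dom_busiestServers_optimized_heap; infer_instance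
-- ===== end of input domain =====

-- B replaces A's sorted available-list + min-heap with one flat per-server state (free flag,
-- end time, count), a release sweep and a cyclic scan per request; objective: simpler.

-- ===== PORT A =====
-- Python's heapq heap of distinct (end_time, server_id) tuples is modelled as the
-- lex-sorted list of its elements: heappush = sorted insert, heappop = head, so the
-- sequence of popped tuples is exactly heapq's (ascending tuple order).
def pvHeapPush (p : Int × Int) (h : List (Int × Int)) : List (Int × Int) :=
  PySem.List.insertBy (fun a b => decide (a.1 < b.1 ∨ (a.1 = b.1 ∧ a.2 < b.2))) p h

-- the 'while busy and busy[0][0] <= current_time' loop: pop the heap head, insort its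
-- server id into the sorted available list
def pvFreeLoop (t : Int) (avail : List Int) : List (Int × Int) → List Int × List (Int × Int)
  | [] => (avail, [])
  | (e, s) :: rest =>
      if e ≤ t then pvFreeLoop t (PySem.List.insertBy (fun a b => decide (a < b)) s avail) rest
      else (avail, (e, s) :: rest)

-- one iteration of A's 'for i in range(len(arrival))' loop; state = (available, busy, request_count)
def pvStepA (k : Int) (arrival load : List Int) (st : List Int × List (Int × Int) × List Int)
    (i : Nat) : List Int × List (Int × Int) × List Int :=
  let t := arrival.getD i 0        -- arrival[i], i < len(arrival)
  let ld := load.getD i 0          -- load[i], in range under Pre_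
  let fr := pvFreeLoop t st.1 st.2.1
  let avail := fr.1
  let busy := fr.2
  let rc := st.2.2
  if avail = [] then (avail, busy, rc)   -- all servers busy, drop request
  else
    let pref := PySem.Int.mod (i : Int) k
    let idx := PySem.List.bisectLeft avail pref
    let pr := if idx < avail.length then (PySem.List.pop? avail (idx : Int)).getD (0, avail)
              else (PySem.List.pop? avail 0).getD (0, avail)   -- pop? never none here (idx < len / avail ≠ [])
    let a := pr.1
    (pr.2, pvHeapPush (t + ld, a) busy, PySem.List.pySetD rc a (PySem.List.pyGetD rc a 0 + 1))

-- '[i for i in range(k) if request_count[i] == max_requests]': request_count has exactly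
-- k entries, so the comprehension is an indexed walk over it (tail-recursive accumulator)
def pvWinnersAux (m : Int) : Int → List Int → List Int → List Int
  | _, [], acc => acc.reverse
  | s, c :: rest, acc => pvWinnersAux m (s + 1) rest (if c == m then s :: acc else acc)

def busiestServers_optimized_heap (k : Int) (arrival : List Int) (load : List Int) : List Int :=
  let init : List Int × List (Int × Int) × List Int :=
    (PySem.List.pyRange 0 k 1, [], List.replicate k.toNat 0)
  let fin := (List.range arrival.length).foldl (pvStepA k arrival load) init
  let rc := fin.2.2
  let m := (PySem.List.max? rc (fun y => y)).getD 0   -- max(request_count); nonempty under Pre_ (k ≥ 1)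
  pvWinnersAux m 0 rc []

-- ===== PORT B =====
-- 'for s in range(k): if not free[s] and end[s] <= t: free[s] = True' — pointwise over the
-- two parallel length-k lists
-- tail-recursive with an accumulator so large k evaluates without deep recursion
def pvSweepAux (t : Int) : List Bool → List Int → List Bool → List Bool
  | [], _, acc => acc.reverse
  | f :: fs, [], acc => acc.reverse ++ (f :: fs)
  | f :: fs, e :: es, acc =>
      pvSweepAux t fs es ((if !f && decide (e ≤ t) then true else f) :: acc)

def pvSweep (t : Int) (fs : List Bool) (es : List Int) : List Bool :=
  pvSweepAux t fs es []

-- 'for j in range(k): s = (i+j)%k; if free[s]: break' — first free server in cyclic order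
def pvScan (free : List Bool) (i k : Int) : List Int → Option Int
  | [] => none
  | j :: js =>
      let s := PySem.Int.mod (i + j) k
      if PySem.List.pyGetD free s false then some s else pvScan free i k js

-- one iteration of B's loop; state = (free, end, count)
def pvStepB (k : Int) (arrival load : List Int) (st : List Bool × List Int × List Int)
    (i : Nat) : List Bool × List Int × List Int :=
  let t := arrival.getD i 0
  let free1 := pvSweep t st.1 st.2.1
  match pvScan free1 (i : Int) k (PySem.List.pyRange 0 k 1) with
  | none => (free1, st.2.1, st.2.2)
  | some s =>
      (PySem.List.pySetD free1 s false,
       PySem.List.pySetD st.2.1 s (t + load.getD i 0),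
       PySem.List.pySetD st.2.2 s (PySem.List.pyGetD st.2.2 s 0 + 1))

def busiestServers_optimized_heap_alt (k : Int) (arrival : List Int) (load : List Int) : List Int :=
  let init : List Bool × List Int × List Int :=
    (List.replicate k.toNat true, List.replicate k.toNat 0, List.replicate k.toNat 0)
  let fin := (List.range arrival.length).foldl (pvStepB k arrival load) init
  let cnt := fin.2.2
  let m := (PySem.List.max? cnt (fun y => y)).getD 0
  pvWinnersAux m 0 cnt []

-- ===== PRECONDITION & SPEC =====
-- Pre_ excludes exactly the inputs where Python A raises: k < 1 (max() of the empty
-- request_count raises ValueError) and len(load) < len(arrival) (load[i] raises IndexError).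
def Pre_busiestServers_optimized_heap (k : Int) (arrival : List Int) (load : List Int) : Prop :=
  1 ≤ k ∧ arrival.length ≤ load.length
instance (k : Int) (arrival : List Int) (load : List Int) : Decidable (Pre_busiestServers_optimized_heap k arrival load) := by unfold Pre_busiestServers_optimized_heap; infer_instance

def pvWitness_busiestServers_optimized_heap : Int × List Int × List Int := (2, [1, 2, 3], [3, 1, 2])

def Spec_busiestServers_optimized_heap (k : Int) (arrival : List Int) (load : List Int) (out : List Int) : Prop := out = busiestServers_optimized_heap_alt k arrival load
instance (k : Int) (arrival : List Int) (load : List Int) (out : List Int) : Decidable (Spec_busiestServers_optimized_heap k arrival load out) := by unfold Spec_busiestServers_optimized_heap; infer_instance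

-- ===== CLAIM (what is proved, stated in full; the proofs are below) =====
def Claim_equal_busiestServers_optimized_heap : Prop := ∀ (k : Int) (arrival : List Int) (load : List Int), Dom_busiestServers_optimized_heap k arrival load → Pre_busiestServers_optimized_heap k arrival load → Spec_busiestServers_optimized_heap k arrival load (busiestServers_optimized_heap k arrival load)

-- ===== LEMMAS AND PROOFS =====

-- Prop-level lexicographic order on (end_time, server_id) pairs (heapq's tuple order)
def pvLex (p q : Int × Int) : Prop := p.1 < q.1 ∨ (p.1 = q.1 ∧ p.2 < q.2)

-- the sorted available list determined by the free flags
def pvAvailOf (k : Int) (free : List Bool) : List Int :=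
  List.map (fun n : Nat => (n : Int)) (List.filter (fun n : Nat => free.getD n false) (List.range k.toNat))

-- the busy heap's contents determined by the free flags and end times
def pvChar (k : Int) (free : List Bool) (endt : List Int) (busy : List (Int × Int)) : Prop :=
  ∀ e s : Int, (e, s) ∈ busy ↔
    ∃ n : Nat, n < k.toNat ∧ s = (n : Int) ∧ free.getD n false = false ∧ endt.getD n 0 = e

def pvInv (k : Int) (free : List Bool) (endt : List Int)
    (avail : List Int) (busy : List (Int × Int)) : Prop :=
  free.length = k.toNat ∧ endt.length = k.toNat ∧ avail = pvAvailOf k free ∧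
  busy.Pairwise pvLex ∧ pvChar k free endt busy

def pvRel (k : Int) (sa : List Int × List (Int × Int) × List Int)
    (sb : List Bool × List Int × List Int) : Prop :=
  pvInv k sb.1 sb.2.1 sa.1 sa.2.1 ∧ sa.2.2 = sb.2.2

lemma pvMem_availOf (k : Int) (free : List Bool) (x : Int) :
    x ∈ pvAvailOf k free ↔ ∃ n : Nat, n < k.toNat ∧ x = (n : Int) ∧ free.getD n false = true := by
  unfold pvAvailOf
  rw [List.mem_map]
  constructor
  · rintro ⟨n, hmem, rfl⟩
    rw [List.mem_filter, List.mem_range] at hmem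
    exact ⟨n, hmem.1, rfl, hmem.2⟩
  · rintro ⟨n, hn, rfl, hf⟩
    exact ⟨n, by rw [List.mem_filter, List.mem_range]; exact ⟨hn, hf⟩, rfl⟩

lemma pvPairwise_availOf (k : Int) (free : List Bool) :
    (pvAvailOf k free).Pairwise (· < ·) := by
  apply List.Pairwise.map
  · intro a b h; exact_mod_cast h
  · exact List.Pairwise.sublist List.filter_sublist List.pairwise_lt_range

lemma pvSortedExt (l1 l2 : List Int) (h1 : l1.Pairwise (· < ·)) (h2 : l2.Pairwise (· < ·))
    (hm : ∀ x, x ∈ l1 ↔ x ∈ l2) : l1 = l2 := by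
  have n1 : l1.Nodup := h1.imp (fun h => ne_of_lt h)
  have n2 : l2.Nodup := h2.imp (fun h => ne_of_lt h)
  have hp : l1.Perm l2 := (List.perm_ext_iff_of_nodup n1 n2).mpr hm
  exact hp.eq_of_pairwise (fun a b _ _ hab hba => le_antisymm hab hba)
    (h1.imp le_of_lt) (h2.imp le_of_lt)

lemma pvInsertBy_pairwise {α : Type} (bef : α → α → Bool)
    (htrans : ∀ a b c, bef a b = true → bef b c = true → bef a c = true) :
    ∀ (xs : List α) (x : α), (∀ y ∈ xs, bef y x = true ∨ bef x y = true) →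
      xs.Pairwise (fun a b => bef a b = true) →
      (PySem.List.insertBy bef x xs).Pairwise (fun a b => bef a b = true) := by
  intro xs
  induction xs with
  | nil =>
    intro x _ _
    have e : PySem.List.insertBy bef x [] = [x] := rfl
    rw [e]; exact List.pairwise_singleton _ _
  | cons y ys ih =>
    intro x hcmp hp
    have e : PySem.List.insertBy bef x (y :: ys) =
        if bef x y then x :: y :: ys else y :: PySem.List.insertBy bef x ys := rfl
    rw [e]
    rcases List.pairwise_cons.mp hp with ⟨hy, hys⟩
    by_cases hxy : bef x y = true
    · rw [if_pos hxy]
      refine List.pairwise_cons.mpr ⟨?_, hp⟩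
      intro z hz
      rcases List.mem_cons.mp hz with rfl | hz
      · exact hxy
      · exact htrans x y z hxy (hy z hz)
    · rw [if_neg hxy]
      refine List.pairwise_cons.mpr ⟨?_, ?_⟩
      · intro z hz
        rcases (PySem.List.mem_insertBy bef x z ys).mp hz with rfl | hz
        · rcases hcmp y List.mem_cons_self with h | h
          · exact h
          · exact absurd h hxy
        · exact hy z hz
      · exact ih x (fun z hz => hcmp z (List.mem_cons_of_mem _ hz)) hys

-- proof-only direct recursion equal to pvSweep
def pvSweepSimple (t : Int) : List Bool → List Int → List Bool
  | [], _ => []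
  | f :: fs, [] => f :: fs
  | f :: fs, e :: es => (if !f && decide (e ≤ t) then true else f) :: pvSweepSimple t fs es

lemma pvSweepAux_eq (t : Int) : ∀ (fs : List Bool) (es : List Int) (acc : List Bool),
    pvSweepAux t fs es acc = acc.reverse ++ pvSweepSimple t fs es := by
  intro fs
  induction fs with
  | nil => intro es acc; cases es <;> simp [pvSweepAux, pvSweepSimple]
  | cons f fs ih =>
    intro es acc
    cases es with
    | nil => simp [pvSweepAux, pvSweepSimple]
    | cons e es => simp [pvSweepAux, pvSweepSimple, ih]

lemma pvSweep_eq_simple (t : Int) (fs : List Bool) (es : List Int) :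
    pvSweep t fs es = pvSweepSimple t fs es := by
  unfold pvSweep
  rw [pvSweepAux_eq]
  simp

lemma pvSweepSimple_length (t : Int) : ∀ (fs : List Bool) (es : List Int),
    (pvSweepSimple t fs es).length = fs.length := by
  intro fs
  induction fs with
  | nil => intro es; rfl
  | cons f fs ih =>
    intro es
    cases es with
    | nil => rfl
    | cons e es => simp [pvSweepSimple, ih]

lemma pvSweep_length (t : Int) (fs : List Bool) (es : List Int)
    (_h : fs.length = es.length) : (pvSweep t fs es).length = fs.length := by
  rw [pvSweep_eq_simple]
  exact pvSweepSimple_length t fs es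

lemma pvSweep_getD (t : Int) : ∀ (fs : List Bool) (es : List Int) (n : Nat),
    fs.length = es.length → n < fs.length →
    (pvSweep t fs es).getD n false = (fs.getD n false || decide (es.getD n 0 ≤ t)) := by
  intro fs
  induction fs with
  | nil => intro es n _ hn; simp at hn
  | cons f fs ih =>
    intro es n hl hn
    cases es with
    | nil => simp at hl
    | cons e es =>
      rw [pvSweep_eq_simple] at *
      cases n with
      | zero => simp [pvSweepSimple]; cases f <;> simp
      | succ n =>
        simp only [pvSweepSimple, List.getD_cons_succ]
        rw [← pvSweep_eq_simple]
        exact ih es n (by simpa using hl) (by simpa using hn)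

lemma pvListExt {α : Type} (d : α) (l1 l2 : List α) (hl : l1.length = l2.length)
    (hg : ∀ n, n < l1.length → l1.getD n d = l2.getD n d) : l1 = l2 := by
  apply List.ext_getElem hl
  intro n h1 h2
  have := hg n h1
  rwa [List.getD_eq_getElem _ _ h1, List.getD_eq_getElem _ _ h2] at this

lemma pvGetD_set_self {α : Type} (l : List α) (n : Nat) (v d : α) (h : n < l.length) :
    (l.set n v).getD n d = v := by
  rw [List.getD_eq_getElem _ _ (by simpa using h)]
  simp

lemma pvGetD_set_ne {α : Type} (l : List α) (n m : Nat) (v d : α) (h : m ≠ n) :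
    (l.set n v).getD m d = l.getD m d := by
  by_cases hm : m < l.length
  · rw [List.getD_eq_getElem _ _ (by simpa using hm), List.getD_eq_getElem _ _ hm,
        List.getElem_set]
    split
    · exfalso; omega
    · rfl
  · rw [List.getD_eq_default _ _ (by simpa using not_lt.mp hm),
        List.getD_eq_default _ _ (not_lt.mp hm)]

lemma pvSweep_eq_of_set (t : Int) (free : List Bool) (endt : List Int) (n : Nat)
    (hn : n < free.length) (hlen : free.length = endt.length) (he : endt.getD n 0 ≤ t) :
    pvSweep t (free.set n true) endt = pvSweep t free endt := by
  apply pvListExt false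
  · rw [pvSweep_length t _ _ (by rw [List.length_set]; exact hlen),
        pvSweep_length t _ _ hlen, List.length_set]
  · intro m hm
    rw [pvSweep_length t _ _ (by rw [List.length_set]; exact hlen), List.length_set] at hm
    rw [pvSweep_getD t _ _ m (by rw [List.length_set]; exact hlen) (by simpa using hm),
        pvSweep_getD t _ _ m hlen hm]
    by_cases hmn : m = n
    · subst hmn
      rw [pvGetD_set_self _ _ _ _ hn,
          (decide_eq_true he : decide (endt.getD m 0 ≤ t) = true)]
      simp
    · rw [pvGetD_set_ne _ _ _ _ _ hmn]

lemma pvSweep_eq_self (t : Int) (free : List Bool) (endt : List Int)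
    (hlen : free.length = endt.length)
    (h : ∀ n, n < free.length → free.getD n false = false → ¬ endt.getD n 0 ≤ t) :
    pvSweep t free endt = free := by
  apply pvListExt false
  · rw [pvSweep_length t _ _ hlen]
  · intro m hm
    rw [pvSweep_length t _ _ hlen] at hm
    rw [pvSweep_getD t _ _ m hlen hm]
    cases hf : free.getD m false
    · simp only [Bool.false_or, decide_eq_false_iff_not]
      exact h m hm hf
    · simp

lemma pvInsort_availOf (k : Int) (free : List Bool) (n : Nat)
    (hlen : free.length = k.toNat) (hn : n < k.toNat) (hf : free.getD n false = false) :
    PySem.List.insertBy (fun a b => decide (a < b)) (n : Int) (pvAvailOf k free) =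
      pvAvailOf k (free.set n true) := by
  apply pvSortedExt
  · have hP : (pvAvailOf k free).Pairwise (fun a b => decide (a < b) = true) :=
      (pvPairwise_availOf k free).imp (fun h => by simpa using h)
    have := pvInsertBy_pairwise (fun a b : Int => decide (a < b))
      (fun a b c hab hbc => by simp at *; omega) (pvAvailOf k free) (n : Int)
      (fun y hy => by
        rcases (pvMem_availOf k free y).mp hy with ⟨m, hmk, rfl, hfm⟩
        have : m ≠ n := fun h => by rw [h, hf] at hfm; exact Bool.false_ne_true hfm
        simp; omega) hP
    exact this.imp (fun h => by simpa using h)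
  · exact pvPairwise_availOf _ _
  · intro x
    rw [PySem.List.mem_insertBy, pvMem_availOf, pvMem_availOf]
    constructor
    · rintro (rfl | ⟨m, hmk, rfl, hfm⟩)
      · exact ⟨n, hn, rfl, pvGetD_set_self _ _ _ _ (by omega)⟩
      · have hmn : m ≠ n := fun h => by rw [h, hf] at hfm; exact Bool.false_ne_true hfm
        exact ⟨m, hmk, rfl, by rw [pvGetD_set_ne _ _ _ _ _ hmn]; exact hfm⟩
    · rintro ⟨m, hmk, rfl, hfm⟩
      by_cases hmn : m = n
      · subst hmn; exact Or.inl rfl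
      · rw [pvGetD_set_ne _ _ _ _ _ hmn] at hfm
        exact Or.inr ⟨m, hmk, rfl, hfm⟩

lemma pvFreeLoop_inv (k t : Int) :
    ∀ (busy : List (Int × Int)) (free : List Bool) (endt avail : List Int),
      free.length = k.toNat → endt.length = k.toNat →
      avail = pvAvailOf k free → busy.Pairwise pvLex → pvChar k free endt busy →
      pvInv k (pvSweep t free endt) endt (pvFreeLoop t avail busy).1 (pvFreeLoop t avail busy).2 := by
  intro busy
  induction busy with
  | nil =>
    intro free endt avail hlen helen havail hpair hchar
    have hsweep : pvSweep t free endt = free := by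
      apply pvSweep_eq_self _ _ _ (by omega)
      intro n hn hf hle
      have hmem : ((endt.getD n 0 : Int), ((n : Nat) : Int)) ∈ ([] : List (Int × Int)) :=
        (hchar _ _).mpr ⟨n, by omega, rfl, hf, rfl⟩
      exact List.not_mem_nil hmem
    simp only [pvFreeLoop]
    exact ⟨by rw [pvSweep_length t free endt (by omega)]; exact hlen, helen,
      by rw [hsweep]; exact havail, List.Pairwise.nil, by rw [hsweep]; exact hchar⟩
  | cons hd rest ih =>
    obtain ⟨e, s⟩ := hd
    intro free endt avail hlen helen havail hpair hchar
    simp only [pvFreeLoop]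
    by_cases he : e ≤ t
    · rw [if_pos he]
      obtain ⟨n, hnk, hsn, hfn, hen⟩ := (hchar e s).mp List.mem_cons_self
      subst hsn
      have hpair' := List.pairwise_cons.mp hpair
      have hnotin : (e, ((n : Nat) : Int)) ∉ rest := by
        intro hmem
        have hthis := hpair'.1 _ hmem
        simp [pvLex] at hthis
      have hins : PySem.List.insertBy (fun a b => decide (a < b)) ((n : Nat) : Int) avail =
          pvAvailOf k (free.set n true) := by
        rw [havail]; exact pvInsort_availOf k free n hlen hnk hfn
      have hchar' : pvChar k (free.set n true) endt rest := by
        intro e' s'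
        constructor
        · intro hmem
          obtain ⟨m, hmk, hsm, hfm, hem⟩ := (hchar e' s').mp (List.mem_cons_of_mem _ hmem)
          have hmn : m ≠ n := by
            intro hEq; subst hEq
            subst hsm
            have he' : e' = e := by rw [← hem, hen]
            subst he'
            exact hnotin hmem
          exact ⟨m, hmk, hsm, by rw [pvGetD_set_ne _ _ _ _ _ hmn]; exact hfm, hem⟩
        · rintro ⟨m, hmk, rfl, hfm, hem⟩
          by_cases hmn : m = n
          · subst hmn
            rw [pvGetD_set_self _ _ _ _ (by omega)] at hfm
            exact absurd hfm (by simp)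
          · rw [pvGetD_set_ne _ _ _ _ _ hmn] at hfm
            have hmem := (hchar e' _).mpr ⟨m, hmk, rfl, hfm, hem⟩
            rcases List.mem_cons.mp hmem with hEq | h
            · exfalso
              have hc : ((m : Nat) : Int) = ((n : Nat) : Int) := congrArg Prod.snd hEq
              omega
            · exact h
      have hih := ih (free.set n true) endt _ (by rw [List.length_set]; exact hlen) helen
        hins hpair'.2 hchar'
      rwa [pvSweep_eq_of_set t free endt n (by omega) (by omega) (by rw [hen]; exact he)] at hih
    · rw [if_neg he]
      have hsweep : pvSweep t free endt = free := by
        apply pvSweep_eq_self _ _ _ (by omega)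
        intro m hm hf hle
        have hmem := (hchar (endt.getD m 0) ((m : Nat) : Int)).mpr ⟨m, by omega, rfl, hf, rfl⟩
        rcases List.mem_cons.mp hmem with hEq | hrest
        · have hc : endt.getD m 0 = e := congrArg Prod.fst hEq
          exact he (by omega)
        · have hthis := (List.pairwise_cons.mp hpair).1 _ hrest
          unfold pvLex at hthis
          exact he (by rcases hthis with h | ⟨h, _⟩ <;> omega)
      exact ⟨by rw [pvSweep_length t free endt (by omega)]; exact hlen, helen,
        by rw [hsweep]; exact havail, hpair, by rw [hsweep]; exact hchar⟩

lemma pvScan_append (free : List Bool) (i k : Int) : ∀ (l1 l2 : List Int),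
    pvScan free i k (l1 ++ l2) =
      match pvScan free i k l1 with
      | some s => some s
      | none => pvScan free i k l2 := by
  intro l1; induction l1 with
  | nil => intro l2; rfl
  | cons j js ih =>
    intro l2
    simp only [List.cons_append, pvScan]
    split <;> simp [ih]

lemma pvScan_range_none (free : List Bool) (i k : Int) : ∀ (m : Nat) (lo : Int),
    (∀ j, lo ≤ j → j < lo + m → PySem.List.pyGetD free (PySem.Int.mod (i + j) k) false = false) →
    pvScan free i k (PySem.List.pyRange lo (lo + m) 1) = none := by
  intro m
  induction m with
  | zero =>
    intro lo _
    rw [show lo + ((0 : Nat) : Int) = lo from by simp,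
        PySem.List.pyRange_one_eq_nil le_rfl]
    rfl
  | succ m ih =>
    intro lo h
    rw [PySem.List.pyRange_one_cons (by push_cast; omega)]
    simp only [pvScan]
    rw [h lo le_rfl (by push_cast; omega)]
    simp only [Bool.false_eq_true, if_false]
    rw [show lo + ((m + 1 : Nat) : Int) = (lo + 1) + (m : Int) from by push_cast; ring]
    exact ih (lo + 1) (fun j h1 h2 => h j (by omega) (by push_cast at h2 ⊢; omega))

lemma pvScan_range_some (free : List Bool) (i k : Int) : ∀ (m : Nat) (lo js : Int),
    lo ≤ js → js < lo + m →
    PySem.List.pyGetD free (PySem.Int.mod (i + js) k) false = true →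
    (∀ j, lo ≤ j → j < js → PySem.List.pyGetD free (PySem.Int.mod (i + j) k) false = false) →
    pvScan free i k (PySem.List.pyRange lo (lo + m) 1) = some (PySem.Int.mod (i + js) k) := by
  intro m
  induction m with
  | zero => intro lo js h1 h2 _ _; exfalso; push_cast at h2; omega
  | succ m ih =>
    intro lo js h1 h2 hpred hprev
    rw [PySem.List.pyRange_one_cons (by push_cast; omega)]
    simp only [pvScan]
    by_cases hlo : lo = js
    · subst hlo; rw [hpred]; simp
    · rw [hprev lo le_rfl (by omega)]
      simp only [Bool.false_eq_true, if_false]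
      rw [show lo + ((m + 1 : Nat) : Int) = (lo + 1) + (m : Int) from by push_cast; ring]
      exact ih (lo + 1) js (by omega) (by push_cast at h2 ⊢; omega) hpred
        (fun j hj1 hj2 => hprev j (by omega) hj2)

lemma pvMod_shift (i j k : Int) (hk : 0 < k) (hj : 0 ≤ j) (hjk : j < k) :
    PySem.Int.mod (i + j) k =
      if PySem.Int.mod i k + j < k then PySem.Int.mod i k + j else PySem.Int.mod i k + j - k := by
  rw [PySem.Int.mod_eq_emod_of_pos hk, PySem.Int.mod_eq_emod_of_pos hk]
  have hj' : j % k = j := Int.emod_eq_of_lt hj hjk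
  have h1 : (i + j) % k = (i % k + j) % k := by rw [Int.add_emod, hj']
  have hp0 : 0 ≤ i % k := Int.emod_nonneg i (ne_of_gt hk)
  have hpk : i % k < k := Int.emod_lt_of_pos i hk
  by_cases hcase : i % k + j < k
  · rw [if_pos hcase, h1, Int.emod_eq_of_lt (by omega) hcase]
  · have h2 : (i % k + j) % k = i % k + j - k := by
      calc (i % k + j) % k = ((i % k + j - k) + k * 1) % k := by ring_nf
        _ = (i % k + j - k) % k := Int.add_mul_emod_self_left _ _ _
        _ = i % k + j - k := Int.emod_eq_of_lt (by omega) (by omega)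
    rw [if_neg hcase, h1, h2]

lemma pvScan_eq_none_of_empty (free : List Bool) (i k : Int) (hk : 0 < k)
    (hav : pvAvailOf k free = []) :
    pvScan free i k (PySem.List.pyRange 0 k 1) = none := by
  rw [show PySem.List.pyRange 0 k 1 = PySem.List.pyRange 0 (0 + ((k.toNat : Nat) : Int)) 1
      from by norm_num [Int.toNat_of_nonneg hk.le]]
  apply pvScan_range_none
  intro j h1 h2
  have hs0 : 0 ≤ PySem.Int.mod (i + j) k := PySem.Int.mod_nonneg (i + j) hk
  have hsk : PySem.Int.mod (i + j) k < k := PySem.Int.mod_lt (i + j) hk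
  rw [PySem.List.pyGetD_of_nonneg free false hs0]
  cases hb : free.getD (PySem.Int.mod (i + j) k).toNat false
  · rfl
  · exfalso
    have hmem : (PySem.Int.mod (i + j) k) ∈ pvAvailOf k free :=
      (pvMem_availOf k free _).mpr
        ⟨(PySem.Int.mod (i + j) k).toNat, by omega, (Int.toNat_of_nonneg hs0).symm, hb⟩
    rw [hav] at hmem
    exact List.not_mem_nil hmem

lemma pvScan_finds (free : List Bool) (i k : Int) (hk : 0 < k)
    (hne : pvAvailOf k free ≠ []) :
    pvScan free i k (PySem.List.pyRange 0 k 1) =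
      some (if PySem.List.bisectLeft (pvAvailOf k free) (PySem.Int.mod i k) < (pvAvailOf k free).length
            then (pvAvailOf k free).getD (PySem.List.bisectLeft (pvAvailOf k free) (PySem.Int.mod i k)) 0
            else (pvAvailOf k free).getD 0 0) := by
  set A := pvAvailOf k free with hA
  have hpair := pvPairwise_availOf k free
  set p := PySem.Int.mod i k with hp
  have hp0 : 0 ≤ p := PySem.Int.mod_nonneg i hk
  have hpk : p < k := PySem.Int.mod_lt i hk
  obtain ⟨hle, hlt_before, hge_after⟩ := PySem.List.bisectLeft_spec A p (hpair.imp le_of_lt)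
  set idx := PySem.List.bisectLeft A p with hidx
  have hmemA : ∀ x ∈ A, 0 ≤ x ∧ x < k ∧ free.getD x.toNat false = true := by
    intro x hx
    obtain ⟨n, hnk, rfl, hf⟩ := (pvMem_availOf k free x).mp hx
    exact ⟨by omega, by omega, by simpa using hf⟩
  have hflag : ∀ s : Int, 0 ≤ s → s < k → free.getD s.toNat false = true → s ∈ A := by
    intro s h0 h1 hf
    exact (pvMem_availOf k free s).mpr ⟨s.toNat, by omega, (Int.toNat_of_nonneg h0).symm, hf⟩
  rw [show PySem.List.pyRange 0 k 1 = PySem.List.pyRange 0 (k - p) 1 ++ PySem.List.pyRange (k - p) k 1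
      from PySem.List.pyRange_one_append 0 (k - p) k (by omega) (by omega)]
  rw [pvScan_append]
  by_cases hcase : idx < A.length
  · have haA : A[idx] ∈ A := List.getElem_mem hcase
    obtain ⟨ha0, hak, haf⟩ := hmemA _ haA
    have hap : p ≤ A[idx] := hge_after idx hcase le_rfl
    have hfirst : pvScan free i k (PySem.List.pyRange 0 (k - p) 1) = some A[idx] := by
      rw [show PySem.List.pyRange 0 (k - p) 1 =
            PySem.List.pyRange 0 (0 + (((k - p).toNat : Nat) : Int)) 1 from by
          rw [show (0 : Int) + (((k - p).toNat : Nat) : Int) = k - p from by omega]]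
      have hm : PySem.Int.mod (i + (A[idx] - p)) k = A[idx] := by
        rw [pvMod_shift i _ k hk (by omega) (by omega), ← hp, if_pos (by omega)]
        ring
      rw [show some A[idx] = some (PySem.Int.mod (i + (A[idx] - p)) k) from by rw [hm]]
      apply pvScan_range_some
      · omega
      · omega
      · rw [hm, PySem.List.pyGetD_of_nonneg free false ha0]
        exact haf
      · intro j hj1 hj2
        have hs : PySem.Int.mod (i + j) k = p + j := by
          rw [pvMod_shift i j k hk hj1 (by omega), ← hp, if_pos (by omega)]
        rw [hs, PySem.List.pyGetD_of_nonneg free false (by omega)]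
        cases hb : free.getD (p + j).toNat false
        · rfl
        · exfalso
          obtain ⟨m, hm2, hme⟩ := List.mem_iff_getElem.mp (hflag (p + j) (by omega) (by omega) hb)
          by_cases hmidx : m < idx
          · have := hlt_before m hm2 hmidx; omega
          · have hle2 : A[idx] ≤ A[m] := by
              rcases Nat.lt_or_ge idx m with h | h
              · exact le_of_lt (List.pairwise_iff_getElem.mp hpair idx m hcase hm2 h)
              · have hEq : idx = m := by omega
                exact le_of_eq (by congr 1)
            omega
    rw [hfirst, if_pos hcase, List.getD_eq_getElem _ _ hcase]
  · have hlen0 : 0 < A.length := List.length_pos_of_ne_nil hne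
    have halllt : ∀ m (hm : m < A.length), A[m] < p := fun m hm => hlt_before m hm (by omega)
    have ha0A : A[0] ∈ A := List.getElem_mem hlen0
    obtain ⟨h00, h0k, h0f⟩ := hmemA _ ha0A
    have h0p : A[0] < p := halllt 0 hlen0
    have hfirstnone : pvScan free i k (PySem.List.pyRange 0 (k - p) 1) = none := by
      rw [show PySem.List.pyRange 0 (k - p) 1 =
            PySem.List.pyRange 0 (0 + (((k - p).toNat : Nat) : Int)) 1 from by
          rw [show (0 : Int) + (((k - p).toNat : Nat) : Int) = k - p from by omega]]
      apply pvScan_range_none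
      intro j hj1 hj2
      have hs : PySem.Int.mod (i + j) k = p + j := by
        rw [pvMod_shift i j k hk hj1 (by omega), ← hp, if_pos (by omega)]
      rw [hs, PySem.List.pyGetD_of_nonneg free false (by omega)]
      cases hb : free.getD (p + j).toNat false
      · rfl
      · exfalso
        obtain ⟨m, hm2, hme⟩ := List.mem_iff_getElem.mp (hflag (p + j) (by omega) (by omega) hb)
        have := halllt m hm2; omega
    have hsecond : pvScan free i k (PySem.List.pyRange (k - p) k 1) = some A[0] := by
      rw [show PySem.List.pyRange (k - p) k 1 =
            PySem.List.pyRange (k - p) ((k - p) + ((p.toNat : Nat) : Int)) 1 from by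
          rw [show (k - p) + ((p.toNat : Nat) : Int) = k from by omega]]
      have hm : PySem.Int.mod (i + (A[0] + (k - p))) k = A[0] := by
        rw [pvMod_shift i _ k hk (by omega) (by omega), ← hp, if_neg (by omega)]
        ring
      rw [show some A[0] = some (PySem.Int.mod (i + (A[0] + (k - p))) k) from by rw [hm]]
      apply pvScan_range_some
      · omega
      · omega
      · rw [hm, PySem.List.pyGetD_of_nonneg free false h00]
        exact h0f
      · intro j hj1 hj2
        have hs : PySem.Int.mod (i + j) k = p + j - k := by
          rw [pvMod_shift i j k hk (by omega) (by omega), ← hp, if_neg (by omega)]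
        rw [hs, PySem.List.pyGetD_of_nonneg free false (by omega)]
        cases hb : free.getD (p + j - k).toNat false
        · rfl
        · exfalso
          obtain ⟨m, hm2, hme⟩ :=
            List.mem_iff_getElem.mp (hflag (p + j - k) (by omega) (by omega) hb)
          have hmin : A[0] ≤ A[m] := by
            rcases Nat.eq_zero_or_pos m with rfl | hpos
            · exact le_rfl
            · exact le_of_lt (List.pairwise_iff_getElem.mp hpair 0 m hlen0 hm2 hpos)
          omega
    rw [hfirstnone, hsecond, if_neg hcase, List.getD_eq_getElem _ _ hlen0]

lemma pvGetElem_inj (l : List Int) (h : l.Pairwise (· < ·)) (m1 m2 : Nat)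
    (h1 : m1 < l.length) (h2 : m2 < l.length) (he : l[m1] = l[m2]) : m1 = m2 := by
  rcases lt_trichotomy m1 m2 with hlt | heq | hgt
  · have := List.pairwise_iff_getElem.mp h m1 m2 h1 h2 hlt; omega
  · exact heq
  · have := List.pairwise_iff_getElem.mp h m2 m1 h2 h1 hgt; omega

lemma pvErase_availOf (k : Int) (free : List Bool) (idx : Nat)
    (hlen : free.length = k.toNat) (hidx : idx < (pvAvailOf k free).length) :
    (pvAvailOf k free).eraseIdx idx =
      pvAvailOf k (free.set ((pvAvailOf k free)[idx].toNat) false) := by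
  have hpair := pvPairwise_availOf k free
  obtain ⟨n, hnk, han, hfn⟩ :=
    (pvMem_availOf k free _).mp (List.getElem_mem hidx)
  have haN : (pvAvailOf k free)[idx].toNat = n := by rw [han]; simp
  rw [haN]
  apply pvSortedExt
  · exact List.Pairwise.sublist (List.eraseIdx_sublist _ _) hpair
  · exact pvPairwise_availOf _ _
  · intro x
    rw [List.mem_eraseIdx_iff_getElem, pvMem_availOf]
    constructor
    · rintro ⟨m, hm, hmne, rfl⟩
      obtain ⟨p, hpk, hxp, hfp⟩ :=
        (pvMem_availOf k free _).mp (List.getElem_mem hm)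
      refine ⟨p, hpk, hxp, ?_⟩
      have hpn : p ≠ n := by
        intro hpn_eq
        apply hmne
        apply pvGetElem_inj _ hpair m idx hm hidx
        rw [hxp, hpn_eq, han]
      rw [pvGetD_set_ne _ _ _ _ _ hpn]
      exact hfp
    · rintro ⟨p, hpk, rfl, hfp⟩
      have hpn : p ≠ n := by
        intro hEq; subst hEq
        rw [pvGetD_set_self _ _ _ _ (by omega)] at hfp
        exact absurd hfp (by simp)
      rw [pvGetD_set_ne _ _ _ _ _ hpn] at hfp
      have hmem : ((p : Nat) : Int) ∈ pvAvailOf k free :=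
        (pvMem_availOf k free _).mpr ⟨p, hpk, rfl, hfp⟩
      obtain ⟨m, hm, hme⟩ := List.mem_iff_getElem.mp hmem
      refine ⟨m, hm, ?_, hme⟩
      intro hEq; subst hEq
      rw [han] at hme
      exact hpn (by omega)

lemma pvAssign_rel (k : Int) (t ld : Int) (free1 : List Bool) (endt : List Int)
    (busy1 : List (Int × Int)) (rc cnt : List Int)
    (hlen1 : free1.length = k.toNat) (helen1 : endt.length = k.toNat)
    (hpair1 : busy1.Pairwise pvLex) (hchar1 : pvChar k free1 endt busy1) (hcnt : rc = cnt)
    (idx : Nat) (hidx : idx < (pvAvailOf k free1).length) :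
    pvRel k
      ((pvAvailOf k free1).eraseIdx idx,
       pvHeapPush (t + ld, (pvAvailOf k free1)[idx]) busy1,
       PySem.List.pySetD rc ((pvAvailOf k free1)[idx])
         (PySem.List.pyGetD rc ((pvAvailOf k free1)[idx]) 0 + 1))
      (PySem.List.pySetD free1 ((pvAvailOf k free1)[idx]) false,
       PySem.List.pySetD endt ((pvAvailOf k free1)[idx]) (t + ld),
       PySem.List.pySetD cnt ((pvAvailOf k free1)[idx])
         (PySem.List.pyGetD cnt ((pvAvailOf k free1)[idx]) 0 + 1)) := by
  obtain ⟨n, hnk, han, hfn⟩ :=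
    (pvMem_availOf k free1 _).mp (List.getElem_mem hidx)
  have haN : (pvAvailOf k free1)[idx].toNat = n := by rw [han]; simp
  have hnfree : n < free1.length := by omega
  have hnendt : n < endt.length := by omega
  dsimp only [pvRel]
  rw [han]
  simp only [PySem.List.pySetD_natCast]
  refine ⟨⟨?_, ?_, ?_, ?_, ?_⟩, ?_⟩
  · dsimp only; rw [List.length_set]; exact hlen1
  · dsimp only; rw [List.length_set]; exact helen1
  · dsimp only
    have hera := pvErase_availOf k free1 idx hlen1 hidx
    rw [haN] at hera
    exact hera
  · dsimp only
    have hP : busy1.Pairwise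
        (fun x y : Int × Int => (decide (x.1 < y.1 ∨ (x.1 = y.1 ∧ x.2 < y.2))) = true) :=
      hpair1.imp (fun h => by simpa [pvLex] using h)
    refine List.Pairwise.imp (fun h => by simpa [pvLex] using h)
      (pvInsertBy_pairwise _ ?_ busy1 (t + ld, ((n : Nat) : Int)) ?_ hP)
    · intro x y z hxy hyz; simp at hxy hyz ⊢; omega
    · intro y hy
      obtain ⟨y1, y2⟩ := y
      obtain ⟨m, hmk, hym, hfm, hem⟩ := (hchar1 y1 y2).mp hy
      have hy2 : y2 ≠ ((n : Nat) : Int) := by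
        intro hEq
        have hmn : m = n := by omega
        rw [hmn] at hfm
        rw [hfm] at hfn
        exact Bool.false_ne_true hfn
      simp only [decide_eq_true_eq]
      omega
  · intro e s
    unfold pvHeapPush
    rw [PySem.List.mem_insertBy]
    constructor
    · rintro (hEq | hmem)
      · have he : e = t + ld := congrArg Prod.fst hEq
        have hs : s = ((n : Nat) : Int) := congrArg Prod.snd hEq
        refine ⟨n, hnk, hs, ?_, ?_⟩
        · rw [pvGetD_set_self _ _ _ _ hnfree]
        · rw [pvGetD_set_self _ _ _ _ hnendt]; exact he.symm
      · obtain ⟨m, hmk, hsm, hfm, hem⟩ := (hchar1 e s).mp hmem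
        have hmn : m ≠ n := by
          intro hEq
          rw [hEq] at hfm
          rw [hfm] at hfn
          exact Bool.false_ne_true hfn
        exact ⟨m, hmk, hsm, by rw [pvGetD_set_ne _ _ _ _ _ hmn]; exact hfm,
          by rw [pvGetD_set_ne _ _ _ _ _ hmn]; exact hem⟩
    · rintro ⟨m, hmk, rfl, hfm, hem⟩
      by_cases hmn : m = n
      · subst hmn
        rw [pvGetD_set_self _ _ _ _ hnendt] at hem
        left
        simp only [Prod.mk.injEq]
        exact ⟨hem.symm, trivial⟩
      · right
        rw [pvGetD_set_ne _ _ _ _ _ hmn] at hfm hem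
        exact (hchar1 e _).mpr ⟨m, hmk, rfl, hfm, hem⟩
  · dsimp only; rw [hcnt]

lemma pvStep_rel (k : Int) (arrival load : List Int) (hk : 1 ≤ k) (i : Nat)
    (sa : List Int × List (Int × Int) × List Int) (sb : List Bool × List Int × List Int)
    (h : pvRel k sa sb) :
    pvRel k (pvStepA k arrival load sa i) (pvStepB k arrival load sb i) := by
  obtain ⟨avail, busy, rc⟩ := sa
  obtain ⟨free, endt, cnt⟩ := sb
  obtain ⟨⟨hlen, helen, havail, hpair, hchar⟩, hcnt⟩ := h
  have hk0 : (0 : Int) < k := by omega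
  obtain ⟨hlen1, helen1, havail1, hpair1, hchar1⟩ :=
    pvFreeLoop_inv k (arrival.getD i 0) busy free endt avail hlen helen havail hpair hchar
  simp only [pvStepA, pvStepB]
  by_cases hE : (pvFreeLoop (arrival.getD i 0) avail busy).1 = []
  · rw [if_pos hE,
      pvScan_eq_none_of_empty _ _ _ hk0 (by rw [← havail1]; exact hE)]
    exact ⟨⟨hlen1, helen1, havail1, hpair1, hchar1⟩, hcnt⟩
  · rw [if_neg hE]
    have hne : pvAvailOf k (pvSweep (arrival.getD i 0) free endt) ≠ [] := by
      rw [← havail1]; exact hE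
    have h0len : 0 < (pvAvailOf k (pvSweep (arrival.getD i 0) free endt)).length :=
      List.length_pos_of_ne_nil hne
    have hscan := pvScan_finds (pvSweep (arrival.getD i 0) free endt) (i : Int) k hk0 hne
    rw [havail1]
    by_cases hidx : PySem.List.bisectLeft (pvAvailOf k (pvSweep (arrival.getD i 0) free endt))
        (PySem.Int.mod (i : Int) k) < (pvAvailOf k (pvSweep (arrival.getD i 0) free endt)).length
    · rw [if_pos hidx, List.getD_eq_getElem _ _ hidx] at hscan
      rw [hscan, if_pos hidx, PySem.List.pop?_natCast _ _ hidx]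
      simp only [Option.getD_some]
      exact pvAssign_rel k (arrival.getD i 0) (load.getD i 0) _ endt _ rc cnt
        hlen1 helen1 hpair1 hchar1 hcnt _ hidx
    · rw [if_neg hidx, List.getD_eq_getElem _ _ h0len] at hscan
      have hpop : PySem.List.pop? (pvAvailOf k (pvSweep (arrival.getD i 0) free endt)) 0 =
          some ((pvAvailOf k (pvSweep (arrival.getD i 0) free endt))[0],
            (pvAvailOf k (pvSweep (arrival.getD i 0) free endt)).eraseIdx 0) := by
        simpa using PySem.List.pop?_natCast _ 0 h0len
      rw [hscan, if_neg hidx, hpop]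
      simp only [Option.getD_some]
      exact pvAssign_rel k (arrival.getD i 0) (load.getD i 0) _ endt _ rc cnt
        hlen1 helen1 hpair1 hchar1 hcnt 0 h0len

lemma pvFold_rel (k : Int) (arrival load : List Int) (hk : 1 ≤ k) :
    ∀ (l : List Nat) (sa : List Int × List (Int × Int) × List Int)
      (sb : List Bool × List Int × List Int), pvRel k sa sb →
      pvRel k (l.foldl (pvStepA k arrival load) sa) (l.foldl (pvStepB k arrival load) sb) := by
  intro l; induction l with
  | nil => intro sa sb h; exact h
  | cons i l ih => intro sa sb h; exact ih _ _ (pvStep_rel k arrival load hk i sa sb h)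

lemma pvInit_rel (k : Int) :
    pvRel k (PySem.List.pyRange 0 k 1, [], List.replicate k.toNat 0)
      (List.replicate k.toNat true, List.replicate k.toNat 0, List.replicate k.toNat 0) := by
  refine ⟨⟨by simp, by simp, ?_, List.Pairwise.nil, ?_⟩, rfl⟩
  · show PySem.List.pyRange 0 k 1 = pvAvailOf k (List.replicate k.toNat true)
    unfold pvAvailOf
    rw [List.filter_eq_self.mpr
      (fun n hn => List.getD_replicate _ (List.mem_range.mp hn))]
    rw [PySem.List.pyRange_one 0 k]
    simp
  · intro e s
    constructor
    · intro h; exact absurd h (List.not_mem_nil)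
    · rintro ⟨n, hn, _, hf, _⟩
      rw [List.getD_replicate _ hn] at hf
      exact absurd hf (by simp)

-- ===== VERDICT (by name: the statement is the Claim_ definition above) =====
theorem busiestServers_optimized_heap_spec : Claim_equal_busiestServers_optimized_heap := by
  intro k arrival load _hdom hpre
  obtain ⟨hk, _hlen⟩ := hpre
  unfold Spec_busiestServers_optimized_heap
  unfold busiestServers_optimized_heap busiestServers_optimized_heap_alt
  have h := pvFold_rel k arrival load hk (List.range arrival.length) _ _ (pvInit_rel k)
  simp only [h.2]
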